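-- pv_equiv track=rewrite | github.com/07-mukul/mukul-project-yotube | app.py | reorder_points
-- ===== SOURCE A (Python) =====
-- def reorder_points(points):
--     """Refined reordering that preserves chronological sequence but ensures Moral is last"""
--     if not points: return []
--
--     # We want to keep the story's natural chronological order (which the AI generates)
--     # and only move the "Moral" to the very end if it's misplaced.
--
--     intro_points = []
--     moral_points = []
--     core_story = []
--
--     for p in points:
--         p_low = p.lower()
--         # MORAL: (Should definitely be at the end)
--         if any(kw in p_low for kw in ["moral", "lesson", "teaches", "message", "prosperous", "tomorrow", "future", "hope you have", "work today", "second chance"]):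
--             moral_points.append(p)
--         # INTRODUCTION: (Should definitely be at the start)
--         elif any(kw in p_low for kw in ["village of", "once upon", "there was a", "lived in", "farmers named", "jack lived with"]):
--             # Only if we don't already have intro points, to avoid pulling too much to the top
--             if not intro_points:
--                 intro_points.append(p)
--             else:
--                 core_story.append(p)
--         else:
--             core_story.append(p)
--
--     # Reassemble: Intro -> Everything else in its original relative order -> Moral
--     return intro_points + core_story + moral_points
-- ===== SOURCE B (Python) =====
-- MORAL_KWS = ["moral", "lesson", "teaches", "message", "prosperous", "tomorrow", "future", "hope you have", "work today", "second chance"]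
-- INTRO_KWS = ["village of", "once upon", "there was a", "lived in", "farmers named", "jack lived with"]
--
-- def _is_moral(p):
--     pl = p.lower()
--     return any(kw in pl for kw in MORAL_KWS)
--
-- def _is_intro(p):
--     pl = p.lower()
--     return any(kw in pl for kw in INTRO_KWS)
--
-- def _span_not_intro(rest):
--     """Split rest at its first intro-keyword element: (prefix before it, suffix from it)."""
--     before = []
--     for k, p in enumerate(rest):
--         if _is_intro(p):
--             return before, rest[k:]
--         before.append(p)
--     return before, []
--
-- def reorder_points(points):
--     morals = [p for p in points if _is_moral(p)]
--     rest = [p for p in points if not _is_moral(p)]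
--     before, after = _span_not_intro(rest)
--     if after:
--         return [after[0]] + before + after[1:] + morals
--     return rest + morals
-- ===== Notes on version B (the rewrite author's own statement) =====
-- stated objective: alternative
-- what changed: Replaces A's single three-bucket accumulator loop by two order-preserving filters (moral vs rest) plus a span split of the rest at its first intro-keyword element, reassembled as first-intro + prefix + suffix + morals.
import Mathlib
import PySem

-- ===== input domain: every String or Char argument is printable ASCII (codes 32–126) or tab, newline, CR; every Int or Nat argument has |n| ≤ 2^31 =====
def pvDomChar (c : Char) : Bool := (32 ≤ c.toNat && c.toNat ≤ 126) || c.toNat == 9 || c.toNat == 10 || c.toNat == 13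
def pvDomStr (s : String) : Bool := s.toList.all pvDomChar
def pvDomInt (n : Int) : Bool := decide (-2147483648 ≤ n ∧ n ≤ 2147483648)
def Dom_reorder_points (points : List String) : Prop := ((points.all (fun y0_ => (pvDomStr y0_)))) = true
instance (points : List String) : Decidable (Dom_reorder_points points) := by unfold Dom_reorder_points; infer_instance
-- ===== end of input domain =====

-- B replaces A's three-bucket accumulator loop by two filters plus a span at the first
-- intro element (different decomposition, same cost); behaviour is identical.

-- ===== PORT A =====
-- shared keyword lists (module constants in both Pythons)
def kwMoral : List String :=
  ["moral", "lesson", "teaches", "message", "prosperous", "tomorrow", "future",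
   "hope you have", "work today", "second chance"]

def kwIntro : List String :=
  ["village of", "once upon", "there was a", "lived in", "farmers named", "jack lived with"]

-- the for-loop of A over (intro_points, moral_points, core_story)
def reorderLoop (intro moral core : List String) : List String → List String
  | [] => intro ++ core ++ moral
  | p :: ps =>
    let pLow := PySem.Str.lower p
    if kwMoral.any (fun kw => PySem.Str.isIn kw pLow) then
      reorderLoop intro (moral ++ [p]) core ps
    else if kwIntro.any (fun kw => PySem.Str.isIn kw pLow) then
      if intro.isEmpty then reorderLoop (intro ++ [p]) moral core ps
      else reorderLoop intro moral (core ++ [p]) ps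
    else
      reorderLoop intro moral (core ++ [p]) ps

def reorder_points (points : List String) : List String :=
  if points.isEmpty then [] else reorderLoop [] [] [] points

-- ===== PORT B =====
def isMoral (p : String) : Bool :=
  let pl := PySem.Str.lower p
  kwMoral.any (fun kw => PySem.Str.isIn kw pl)

def isIntro (p : String) : Bool :=
  let pl := PySem.Str.lower p
  kwIntro.any (fun kw => PySem.Str.isIn kw pl)

-- _span_not_intro: split at the first intro-keyword element (loop with a `before` accumulator)
def spanLoop (before : List String) : List String → List String × List String
  | [] => (before, [])
  | p :: ps => if isIntro p then (before, p :: ps) else spanLoop (before ++ [p]) ps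

def spanNotIntro (rest : List String) : List String × List String := spanLoop [] rest

def reorder_points_alt (points : List String) : List String :=
  let morals := points.filter (fun p => isMoral p)
  let rest := points.filter (fun p => !isMoral p)
  let ba := spanNotIntro rest
  match ba.2 with
  | x :: xs => [x] ++ ba.1 ++ xs ++ morals
  | [] => rest ++ morals

-- ===== PRECONDITION & SPEC =====
def Spec_reorder_points (points : List String) (out : List String) : Prop := out = reorder_points_alt points
instance (points : List String) (out : List String) : Decidable (Spec_reorder_points points out) := by unfold Spec_reorder_points; infer_instance

-- ===== CLAIM (what is proved, stated in full; the proofs are below) =====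
def Claim_equal_reorder_points : Prop := ∀ (points : List String), Dom_reorder_points points → Spec_reorder_points points (reorder_points points)

-- ===== LEMMAS AND PROOFS =====

-- the span loop's accumulator factors out
theorem spanLoop_acc (xs : List String) : ∀ (before : List String),
    spanLoop before xs = (before ++ (spanLoop [] xs).1, (spanLoop [] xs).2) := by
  induction xs with
  | nil => intro before; simp [spanLoop]
  | cons p ps ih =>
    intro before
    by_cases hi : isIntro p
    · simp [spanLoop, hi]
    · simp only [spanLoop, hi, Bool.false_eq_true, if_false, ih (before ++ [p])]
      rw [ih ([] ++ [p])]; simp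

-- A's inline keyword tests are definitionally B's predicates
theorem any_moral_eq (p : String) :
    (kwMoral.any fun kw => PySem.Str.isIn kw (PySem.Str.lower p)) = isMoral p := rfl
theorem any_intro_eq (p : String) :
    (kwIntro.any fun kw => PySem.Str.isIn kw (PySem.Str.lower p)) = isIntro p := rfl

-- once an intro point has been found, A only appends to core/moral
theorem reorderLoop_found (ps : List String) : ∀ (x : String) (intro moral core : List String),
    reorderLoop (intro ++ [x]) moral core ps
      = (intro ++ [x]) ++ (core ++ ps.filter (fun p => !isMoral p))
          ++ (moral ++ ps.filter (fun p => isMoral p)) := by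
  induction ps with
  | nil => intro x intro' moral core; simp [reorderLoop]
  | cons p ps ih =>
    intro x intro' moral core
    simp only [reorderLoop, any_moral_eq, any_intro_eq, List.filter_cons]
    by_cases hm : isMoral p
    · simp [hm, ih x intro' (moral ++ [p]) core]
    · by_cases hi : isIntro p
      · simp [hm, hi, ih x intro' moral (core ++ [p])]
      · simp [hm, hi, ih x intro' moral (core ++ [p])]

-- while no intro point has been found, A's state matches B's span decomposition
theorem reorderLoop_search (ps : List String) : ∀ (moral before : List String),
    reorderLoop [] moral before ps
      = (match (spanNotIntro (ps.filter (fun p => !isMoral p))).2 with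
         | x :: xs =>
             x :: (before ++ (spanNotIntro (ps.filter (fun p => !isMoral p))).1)
               ++ xs ++ (moral ++ ps.filter (fun p => isMoral p))
         | [] => (before ++ ps.filter (fun p => !isMoral p))
               ++ (moral ++ ps.filter (fun p => isMoral p))) := by
  induction ps with
  | nil => intro moral before; simp [reorderLoop, spanNotIntro, spanLoop]
  | cons p ps ih =>
    intro moral before
    simp only [reorderLoop, any_moral_eq, any_intro_eq, List.filter_cons]
    by_cases hm : isMoral p
    · have := ih (moral ++ [p]) before
      rcases h : (spanNotIntro (ps.filter (fun p => !isMoral p))).2 with _ | ⟨x, xs⟩ <;>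
        simp [hm, h] at this ⊢ <;> simp [this]
    · by_cases hi : isIntro p
      · have hf := reorderLoop_found ps p [] moral before
        simp only [List.nil_append] at hf
        simp [hm, hi, hf, spanNotIntro, spanLoop]
      · have hacc := ih moral (before ++ [p])
        have hsp : spanNotIntro (p :: ps.filter (fun p => !isMoral p))
            = (p :: (spanNotIntro (ps.filter (fun p => !isMoral p))).1,
               (spanNotIntro (ps.filter (fun p => !isMoral p))).2) := by
          simp only [spanNotIntro, spanLoop, hi, Bool.false_eq_true, if_false]
          rw [spanLoop_acc]; simp
        rcases h : (spanNotIntro (ps.filter (fun p => !isMoral p))).2 with _ | ⟨x, xs⟩ <;>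
          simp [hm, hi, h, hsp] at hacc ⊢ <;> simp [hacc]

-- ===== VERDICT (by name: the statement is the Claim_ definition above) =====
theorem reorder_points_spec : Claim_equal_reorder_points := by
  intro points _
  unfold Spec_reorder_points reorder_points reorder_points_alt
  cases points with
  | nil => simp [spanNotIntro, spanLoop]
  | cons p ps =>
    rw [if_neg (by simp), reorderLoop_search (p :: ps) [] []]
    rcases h : (spanNotIntro ((p :: ps).filter (fun q => !isMoral q))).2 with _ | ⟨x, xs⟩ <;>
      simp [h]
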